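-- pv_equiv track=rewrite | github.com/uscensusbureau/ADRM_Project | Household Graph/oysterer-dwm-graph-8711cd315cf3/GDWM18/graph/DWM_ModularityGraphClustering.py | find_shared_nodes_of_partition
-- ===== SOURCE A (Python) =====
-- def find_involved_edges(node, edges):
--     involved_edges = []
--     for e in edges:
--         source_node = e[0]
--         target_node = e[1]
--         weight = e[2]
--         if (source_node == node) or (target_node == node):
--             involved_edges.append((source_node, target_node, weight))
--     return involved_edges
--
-- def find_shared_nodes_of_partition(partition, edges):
--     source_nodes = []
--     target_nodes = []
--     weights = []
--     shared_nodes = []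
--     for n in partition:
--         for e in edges:
--             source_node = e[0]
--             target_node = e[1]
--             weight = e[2]
--             if (source_node == n) or (target_node == n):
--                 source_nodes.append(source_node)
--                 target_nodes.append(target_node)
--                 weights.append(weight)
--     for s in source_nodes:
--         c = source_nodes.count(s)
--         if c > 1:
--             involved_edges = find_involved_edges(s, edges)
--             for ie in involved_edges:
--                 s_n = ie[0]
--                 t_n = ie[1]
--                 w = ie[2]
--                 if ((s_n == s) and (t_n in partition)) or ((t_n == s) and (s_n in partition)):
--                     shared_nodes.append((s, w))
--     return shared_nodes
-- ===== SOURCE B (Python) =====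
-- def find_shared_nodes_of_partition(partition, edges):
--     pset = set(partition)
--     # endpoint -> list of edges touching it, in edge order (self-loops listed once)
--     pairs = []
--     for e in edges:
--         pairs.append((e[0], e))
--         if e[1] != e[0]:
--             pairs.append((e[1], e))
--     adj = {}
--     for k, e in pairs:
--         adj.setdefault(k, []).append(e)
--     source_nodes = [e[0] for n in partition for e in adj.get(n, [])]
--     cnt = {}
--     for s in source_nodes:
--         cnt[s] = cnt.get(s, 0) + 1
--     out = []
--     for s in source_nodes:
--         if cnt.get(s, 0) > 1:
--             for (a, b, w) in adj.get(s, []):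
--                 if (a == s and b in pset) or (b == s and a in pset):
--                     out.append((s, w))
--     return out
-- ===== Notes on version B (the rewrite author's own statement) =====
-- stated objective: faster
-- what changed: B builds an endpoint-to-edges adjacency index, a dict occurrence counter and a set of the partition once, replacing A's per-occurrence list.count and full edge rescans per shared node, preserving orders exactly.
import Mathlib
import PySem

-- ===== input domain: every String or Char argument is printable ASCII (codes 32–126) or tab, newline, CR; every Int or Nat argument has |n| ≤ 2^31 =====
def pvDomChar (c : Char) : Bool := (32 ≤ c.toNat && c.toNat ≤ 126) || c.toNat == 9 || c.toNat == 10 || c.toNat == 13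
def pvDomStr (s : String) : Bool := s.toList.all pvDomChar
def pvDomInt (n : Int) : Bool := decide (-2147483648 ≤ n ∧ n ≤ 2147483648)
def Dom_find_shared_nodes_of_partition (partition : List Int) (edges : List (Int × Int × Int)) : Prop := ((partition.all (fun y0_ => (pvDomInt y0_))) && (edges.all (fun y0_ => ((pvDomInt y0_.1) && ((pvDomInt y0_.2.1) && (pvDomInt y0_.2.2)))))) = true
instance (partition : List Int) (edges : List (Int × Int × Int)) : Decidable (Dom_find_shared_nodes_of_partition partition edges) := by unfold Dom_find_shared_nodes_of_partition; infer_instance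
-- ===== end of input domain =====

-- B replaces A's repeated list.count and per-occurrence edge rescans by a counter dict,
-- an endpoint→edges adjacency index and a partition set (objective: faster, asymptotic).

-- ===== PORT A =====
def find_involved_edges (node : Int) (edges : List (Int × Int × Int)) : List (Int × Int × Int) :=
  edges.foldl (fun involved e =>
    if e.1 = node ∨ e.2.1 = node then involved ++ [(e.1, e.2.1, e.2.2)] else involved) []

def find_shared_nodes_of_partition (partition : List Int) (edges : List (Int × Int × Int)) : List (Int × Int) :=
  let st := partition.foldl (fun (st : List Int × List Int × List Int) n =>
      edges.foldl (fun (st : List Int × List Int × List Int) e =>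
        if e.1 = n ∨ e.2.1 = n then (st.1 ++ [e.1], st.2.1 ++ [e.2.1], st.2.2 ++ [e.2.2])
        else st) st)
    ([], [], [])
  st.1.foldl (fun shared s =>
    if st.1.count s > 1 then
      (find_involved_edges s edges).foldl (fun shared ie =>
        if (ie.1 = s ∧ ie.2.1 ∈ partition) ∨ (ie.2.1 = s ∧ ie.1 ∈ partition) then
          shared ++ [(s, ie.2.2)]
        else shared) shared
    else shared) []

-- ===== PORT B =====
def find_shared_nodes_of_partition_alt (partition : List Int) (edges : List (Int × Int × Int)) : List (Int × Int) :=
  let pset := PySem.Set.ofList partition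
  let pairs := edges.foldl (fun acc e =>
      let acc1 := acc ++ [(e.1, e)]
      if e.2.1 ≠ e.1 then acc1 ++ [(e.2.1, e)] else acc1) []
  let adj := pairs.foldl (fun d p => d.modify p.1 [] (· ++ [p.2]))
    (PySem.Dict.empty : PySem.Dict Int (List (Int × Int × Int)))
  let source_nodes := partition.flatMap (fun n => (adj.getD n []).map (·.1))
  let cnt := source_nodes.foldl (fun d s => d.insert s (d.getD s 0 + 1))
    (PySem.Dict.empty : PySem.Dict Int Int)
  source_nodes.foldl (fun out s =>
    if cnt.getD s 0 > 1 then
      (adj.getD s []).foldl (fun out e =>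
        if (e.1 = s ∧ pset.contains e.2.1) ∨ (e.2.1 = s ∧ pset.contains e.1) then
          out ++ [(s, e.2.2)]
        else out) out
    else out) []

-- ===== PRECONDITION & SPEC =====
def Spec_find_shared_nodes_of_partition (partition : List Int) (edges : List (Int × Int × Int)) (out : List (Int × Int)) : Prop := out = find_shared_nodes_of_partition_alt partition edges
instance (partition : List Int) (edges : List (Int × Int × Int)) (out : List (Int × Int)) : Decidable (Spec_find_shared_nodes_of_partition partition edges out) := by unfold Spec_find_shared_nodes_of_partition; infer_instance

-- ===== CLAIM (what is proved, stated in full; the proofs are below) =====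
def Claim_equal_find_shared_nodes_of_partition : Prop := ∀ (partition : List Int) (edges : List (Int × Int × Int)), Dom_find_shared_nodes_of_partition partition edges → Spec_find_shared_nodes_of_partition partition edges (find_shared_nodes_of_partition partition edges)

-- ===== LEMMAS AND PROOFS =====

-- A's helper collects exactly the edges touching `node`, in order.
theorem fie_eq (node : Int) (edges : List (Int × Int × Int)) :
    find_involved_edges node edges
      = edges.filter (fun e => decide (e.1 = node ∨ e.2.1 = node)) := by
  unfold find_involved_edges
  induction edges using List.reverseRecOn with
  | nil => rfl
  | append_singleton es e ih =>
      simp only [List.foldl_append, List.foldl_cons, List.foldl_nil, ih, List.filter_append,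
        List.filter_cons, List.filter_nil]
      by_cases h : e.1 = node ∨ e.2.1 = node <;> simp [h]

-- first component of A's collection loop over the edges, for one partition node
theorem fstA_inner (n : Int) (edges : List (Int × Int × Int))
    (st : List Int × List Int × List Int) :
    (edges.foldl (fun (st : List Int × List Int × List Int) e =>
        if e.1 = n ∨ e.2.1 = n then (st.1 ++ [e.1], st.2.1 ++ [e.2.1], st.2.2 ++ [e.2.2])
        else st) st).1
      = st.1 ++ ((edges.filter (fun e => decide (e.1 = n ∨ e.2.1 = n))).map (·.1)) := by
  induction edges generalizing st with
  | nil => simp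
  | cons e es ih =>
      simp only [List.foldl_cons, List.filter_cons]
      by_cases h : e.1 = n ∨ e.2.1 = n <;> simp [h, ih]

-- first component of A's whole collection loop
theorem fstA (partition : List Int) (edges : List (Int × Int × Int))
    (st : List Int × List Int × List Int) :
    (partition.foldl (fun (st : List Int × List Int × List Int) n =>
        edges.foldl (fun (st : List Int × List Int × List Int) e =>
          if e.1 = n ∨ e.2.1 = n then (st.1 ++ [e.1], st.2.1 ++ [e.2.1], st.2.2 ++ [e.2.2])
          else st) st) st).1
      = st.1 ++ partition.flatMap
          (fun n => (edges.filter (fun e => decide (e.1 = n ∨ e.2.1 = n))).map (·.1)) := by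
  induction partition generalizing st with
  | nil => simp
  | cons n ns ih => simp [List.foldl_cons, ih, fstA_inner]

-- B's pair list, as a flatMap
theorem pairs_eq (edges : List (Int × Int × Int)) :
    edges.foldl (fun acc e =>
        let acc1 := acc ++ [(e.1, e)]
        if e.2.1 ≠ e.1 then acc1 ++ [(e.2.1, e)] else acc1) []
      = edges.flatMap (fun e => (e.1, e) :: (if e.2.1 ≠ e.1 then [(e.2.1, e)] else [])) := by
  have h := PySem.List.foldl_append_eq_flatMap
    (fun e : Int × Int × Int => (e.1, e) :: (if e.2.1 ≠ e.1 then [(e.2.1, e)] else []))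
    edges ([] : List (Int × (Int × Int × Int)))
  rw [List.nil_append] at h
  rw [← h]
  apply PySem.List.foldl_congr_mem
  intro acc e _
  by_cases hx : e.2.1 = e.1 <;> simp [hx]

-- B's adjacency dict looks up exactly A's involved-edges list
theorem adj_eq (edges : List (Int × Int × Int)) (c : Int) :
    ((edges.foldl (fun acc e =>
          let acc1 := acc ++ [(e.1, e)]
          if e.2.1 ≠ e.1 then acc1 ++ [(e.2.1, e)] else acc1) []).foldl
        (fun d p => d.modify p.1 [] (· ++ [p.2]))
        (PySem.Dict.empty : PySem.Dict Int (List (Int × Int × Int)))).getD c []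
      = edges.filter (fun e => decide (e.1 = c ∨ e.2.1 = c)) := by
  rw [pairs_eq, PySem.Dict.getD_foldl_modify_append, PySem.Dict.getD_empty]
  induction edges with
  | nil => rfl
  | cons e es ih =>
      rw [List.flatMap_cons, List.filter_append, List.map_append, List.nil_append] at *
      rw [ih, List.filter_cons]
      by_cases h1 : e.1 = c
      · by_cases h2 : e.2.1 = e.1 <;> simp [h1, h2]
      · by_cases h2 : e.2.1 = c
        · have h3 : e.2.1 ≠ e.1 := fun hh => h1 (hh ▸ h2)
          have h4 : ¬ (c = e.1) := fun hh => h3 (h2.trans hh)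
          simp [h1, h2, h4]
        · by_cases h3 : e.2.1 = e.1 <;> simp [h1, h2, h3]

-- ===== VERDICT (by name: the statement is the Claim_ definition above) =====
theorem find_shared_nodes_of_partition_spec : Claim_equal_find_shared_nodes_of_partition := by
  intro partition edges _
  unfold Spec_find_shared_nodes_of_partition
  unfold find_shared_nodes_of_partition find_shared_nodes_of_partition_alt
  simp only [fstA, fie_eq, adj_eq, PySem.Dict.getD_foldl_insert_add_one, PySem.Dict.getD_empty,
    List.nil_append, zero_add, gt_iff_lt, Nat.one_lt_cast]
  apply PySem.List.foldl_congr_mem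
  intro acc s _
  have hmem : ∀ x : Int, ((PySem.Set.ofList partition).contains x = true) ↔ x ∈ partition := by
    intro x; rw [PySem.Set.contains_iff, PySem.Set.mem_ofList]
  simp only [hmem]
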